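-- pv_equiv track=rewrite | github.com/ansonmiu0214/algorithms | 2018-06-30_Regular-Expression-Matching/solution.py | pattern_to_nfa
-- ===== SOURCE A (Python) =====
-- def pattern_to_nfa(p, start = 0):
-- 	p_ptr, p_end = 0, len(p)
-- 	if p_ptr == p_end:
-- 		return ([], start)
--
-- 	next = start
-- 	letter = p[p_ptr]
-- 	transitions = []
-- 	p_ptr += 1
--
-- 	transitions.append((start, letter, start + 1))
-- 	if p_ptr < p_end and p[p_ptr] == '*':
-- 		p_ptr += 1
-- 		next += 1
--
-- 		transitions.append((start + 1, '', start))
-- 		transitions.append((start + 1, '', start + 2))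
-- 		transitions.append((start, '', start + 2))
--
-- 	next += 1
-- 	rest, accept = pattern_to_nfa(p[p_ptr:], next)
-- 	return transitions + rest, accept
-- ===== SOURCE B (Python) =====
-- def pattern_to_nfa(p, start=0):
--     # Stage 1: tokenize the pattern into (char, starred) tokens.
--     toks = []
--     i = 0
--     while i < len(p):
--         if i + 1 < len(p) and p[i + 1] == '*':
--             toks.append((p[i], True))
--             i += 2
--         else:
--             toks.append((p[i], False))
--             i += 1
--     # Stage 2: closed-form state offsets via prefix sums of token widths.
--     offs = [start]
--     for _, st in toks:
--         offs.append(offs[-1] + (2 if st else 1))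
--     # Stage 3: emit each token's transitions from its precomputed offset.
--     transitions = []
--     for (c, st), s in zip(toks, offs):
--         if st:
--             transitions += [(s, c, s + 1), (s + 1, '', s),
--                             (s + 1, '', s + 2), (s, '', s + 2)]
--         else:
--             transitions.append((s, c, s + 1))
--     return transitions, offs[-1]
-- ===== Notes on version B (the rewrite author's own statement) =====
-- stated objective: faster
-- what changed: Replaced A's slice-off-a-prefix recursion with return-time list concatenation by three staged passes: tokenize the pattern into (char, starred) tokens, compute each token's state offset by a prefix sum of token widths, then emit all transitions in one flat pass.
import Mathlib
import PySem

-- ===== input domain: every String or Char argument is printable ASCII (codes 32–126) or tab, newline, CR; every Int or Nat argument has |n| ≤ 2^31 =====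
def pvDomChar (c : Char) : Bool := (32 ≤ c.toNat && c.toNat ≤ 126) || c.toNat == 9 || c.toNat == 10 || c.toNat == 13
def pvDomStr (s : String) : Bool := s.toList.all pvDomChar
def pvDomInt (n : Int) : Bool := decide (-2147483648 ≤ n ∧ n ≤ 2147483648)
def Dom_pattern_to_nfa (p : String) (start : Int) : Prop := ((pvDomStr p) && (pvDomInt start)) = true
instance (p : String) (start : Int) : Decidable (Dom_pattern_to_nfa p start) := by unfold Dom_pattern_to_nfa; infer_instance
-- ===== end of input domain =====

-- B replaces A's slice-and-concatenate recursion by three staged passes (tokenize,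
-- prefix-sum state offsets, flat emission), removing the quadratic slicing/concatenation.

-- ===== PORT A =====
-- Port of A: recursion on the character list; the 'letter :: '*' :: rest' pattern is A's
-- 'p_ptr < p_end and p[p_ptr] == '*'' test, and the structural tail is A's slice p[p_ptr:].
def pattern_to_nfa_rec : List Char → Int → (List (Int × String × Int)) × Int
  | [], start => ([], start)
  | letter :: '*' :: rest, start =>
      let res := pattern_to_nfa_rec rest (start + 2)
      ([(start, String.ofList [letter], start + 1), (start + 1, "", start),
        (start + 1, "", start + 2), (start, "", start + 2)] ++ res.1, res.2)
  | letter :: rest, start =>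
      let res := pattern_to_nfa_rec rest (start + 1)
      ([(start, String.ofList [letter], start + 1)] ++ res.1, res.2)

def pattern_to_nfa (p : String) (start : Int) : (List (Int × String × Int)) × Int :=
  pattern_to_nfa_rec p.toList start

-- ===== PORT B =====
-- Stage 1 of Source B: split the pattern into (char, starred) tokens.
def pvTokens : List Char → List (Char × Bool)
  | [] => []
  | c :: rest =>
      if rest.head? = some '*' then (c, true) :: pvTokens rest.tail
      else (c, false) :: pvTokens rest
termination_by l => l.length
decreasing_by
  all_goals cases rest <;> simp_all

-- Stage 3 of Source B: the transitions one token contributes, given its state offset.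
def pvEmit (s : Int) (t : Char × Bool) : List (Int × String × Int) :=
  if t.2 then [(s, String.ofList [t.1], s + 1), (s + 1, "", s), (s + 1, "", s + 2), (s, "", s + 2)]
  else [(s, String.ofList [t.1], s + 1)]

-- Stage 2 of Source B (offs = prefix sums of token widths) is List.scanl; accept = offs[-1].
def pattern_to_nfa_alt (p : String) (start : Int) : (List (Int × String × Int)) × Int :=
  let toks := pvTokens p.toList
  let offs := List.scanl (fun s t => s + (if t.2 then (2 : Int) else 1)) start toks
  ((toks.zip offs).flatMap (fun ts => pvEmit ts.2 ts.1), offs.getLastD start)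

-- ===== PRECONDITION & SPEC =====
def Spec_pattern_to_nfa (p : String) (start : Int) (out : (List (Int × String × Int)) × Int) : Prop := out = pattern_to_nfa_alt p start
instance (p : String) (start : Int) (out : (List (Int × String × Int)) × Int) : Decidable (Spec_pattern_to_nfa p start out) := by unfold Spec_pattern_to_nfa; infer_instance

-- ===== CLAIM =====
def Claim_equal_pattern_to_nfa : Prop := ∀ (p : String) (start : Int), Dom_pattern_to_nfa p start → Spec_pattern_to_nfa p start (pattern_to_nfa p start)

-- ===== LEMMAS AND PROOFS =====

-- B's core on a token list, as a function of the shared start state.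
def pvBuild (toks : List (Char × Bool)) (s : Int) : (List (Int × String × Int)) × Int :=
  let offs := List.scanl (fun s t => s + (if t.2 then (2 : Int) else 1)) s toks
  ((toks.zip offs).flatMap (fun ts => pvEmit ts.2 ts.1), offs.getLastD s)

theorem scanl_getLastD (f : Int → Char × Bool → Int) (toks : List (Char × Bool)) (s d : Int) :
    (List.scanl f s toks).getLastD d = (List.scanl f s toks).getLastD s := by
  cases toks <;> simp only [List.scanl_nil, List.scanl_cons, List.getLastD_cons]

theorem pvBuild_cons (c : Char) (b : Bool) (toks : List (Char × Bool)) (s : Int) :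
    pvBuild ((c, b) :: toks) s =
      (pvEmit s (c, b) ++ (pvBuild toks (s + (if b then 2 else 1))).1,
       (pvBuild toks (s + (if b then 2 else 1))).2) := by
  simp only [pvBuild, List.scanl_cons, List.zip_cons_cons, List.flatMap_cons,
    List.getLastD_cons]
  rw [scanl_getLastD]

theorem rec_cons_not_star (c : Char) (rest : List Char) (h : rest.head? ≠ some '*') (s : Int) :
    pattern_to_nfa_rec (c :: rest) s =
      ((s, String.ofList [c], s + 1) :: (pattern_to_nfa_rec rest (s + 1)).1,
       (pattern_to_nfa_rec rest (s + 1)).2) := by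
  cases rest with
  | nil => simp [pattern_to_nfa_rec]
  | cons r rs =>
    have hr : r ≠ '*' := by simpa using h
    conv_lhs => rw [pattern_to_nfa_rec.eq_def]
    split
    · simp_all
    · rename_i heq; rw [List.cons.injEq, List.cons.injEq] at heq; exact absurd heq.2.1 hr
    · rename_i heq; rw [List.cons.injEq] at heq; simp_all

theorem rec_eq_build (cs : List Char) : ∀ s, pattern_to_nfa_rec cs s = pvBuild (pvTokens cs) s := by
  induction cs using pvTokens.induct with
  | case1 =>
      intro s
      rw [show pvTokens [] = [] by simp [pvTokens]]
      rfl
  | case2 c rest h ih =>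
      intro s
      obtain ⟨rs, hr⟩ : ∃ rs, rest = '*' :: rs := by
        cases rest with
        | nil => simp at h
        | cons r rs' => exact ⟨rs', by simpa using h⟩
      subst hr
      rw [show pvTokens (c :: '*' :: rs) = (c, true) :: pvTokens rs by simp [pvTokens],
        pvBuild_cons]
      simp only [List.tail_cons] at ih
      simp only [pattern_to_nfa_rec, pvEmit, ih]
      simp
  | case3 c rest h ih =>
      intro s
      rw [show pvTokens (c :: rest) = (c, false) :: pvTokens rest by
            rw [pvTokens]; simp [h],
        pvBuild_cons, rec_cons_not_star c rest h s]
      simp only [pvEmit, ih]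
      simp

-- ===== VERDICT =====
theorem pattern_to_nfa_spec : Claim_equal_pattern_to_nfa := by
  intro p start _
  unfold Spec_pattern_to_nfa pattern_to_nfa pattern_to_nfa_alt
  rw [rec_eq_build]
  rfl
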